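-- pv_equiv track=rewrite | github.com/MatthewRBevins/Daily-Coding-Problems | 21-30/day21.py | calcRooms
-- ===== SOURCE A (Python) =====
-- def calcRooms(lectures):
--     rooms = []
--     for lecture in lectures:
--         canFit = False
--         for room in rooms:
--             if lecture[1] < room[0] or lecture[0] > room[1]:
--                 canFit = True
--                 break
--         if not canFit:
--             rooms.append(lecture)
--     return len(rooms)
--
-- lectures = [[30,75],[0,50],[60,150]]
-- ===== SOURCE B (Python) =====
-- def calcRooms(lectures):
--     # A lecture joins the "rooms" set iff it overlaps every lecture
--     # already in the set, which is equivalent to overlapping the running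
--     # intersection window [hi, lo] (hi = max start, lo = min end of the set).
--     count = 0
--     hi = lo = 0
--     for lec in lectures:
--         s, e = lec[0], lec[1]
--         if count == 0:
--             count, hi, lo = 1, s, e
--         elif hi <= e and s <= lo:
--             count += 1
--             if s > hi:
--                 hi = s
--             if e < lo:
--                 lo = e
--     return count
-- ===== Notes on version B (the rewrite author's own statement) =====
-- stated objective: alternative
-- what changed: B drops A's rooms list entirely: it keeps only a count and the running intersection window (max start, min end) of the accepted set and tests each lecture against that window, instead of A's inner disjointness scan over all accepted rooms.
-- outside the precondition, e.g. on calcRooms([[5]]): A returns 1, B raises IndexError; on calcRooms([[5], [0, 1]]): A returns 1, B raises IndexError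
import Mathlib
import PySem

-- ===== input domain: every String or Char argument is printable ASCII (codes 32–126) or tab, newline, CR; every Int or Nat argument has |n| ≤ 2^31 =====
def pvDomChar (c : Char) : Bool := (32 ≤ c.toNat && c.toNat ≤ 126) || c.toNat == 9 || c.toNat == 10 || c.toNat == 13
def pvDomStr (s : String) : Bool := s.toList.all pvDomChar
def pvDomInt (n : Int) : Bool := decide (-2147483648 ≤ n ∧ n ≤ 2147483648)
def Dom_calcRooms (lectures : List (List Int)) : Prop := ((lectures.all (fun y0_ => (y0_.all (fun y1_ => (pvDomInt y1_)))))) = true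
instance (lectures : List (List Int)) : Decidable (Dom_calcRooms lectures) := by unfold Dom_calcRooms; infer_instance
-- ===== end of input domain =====

-- B replaces A's inner scan over the list of accepted rooms by a running
-- intersection window (max start, min end) of the accepted set: a different
-- algorithm that keeps three scalars instead of the list of rooms.

-- ===== PORT A =====
-- inner 'for room in rooms: … break' loop: true iff some room is disjoint from lecture
def pvCanFit (lecture : List Int) : List (List Int) → Bool
  | [] => false
  | room :: rest =>
      if PySem.List.pyGetD lecture 1 0 < PySem.List.pyGetD room 0 0
         ∨ PySem.List.pyGetD lecture 0 0 > PySem.List.pyGetD room 1 0 then true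
      else pvCanFit lecture rest

def calcRooms (lectures : List (List Int)) : Int :=
  ((lectures.foldl
      (fun rooms lecture => if !pvCanFit lecture rooms then rooms ++ [lecture] else rooms)
      []).length : Int)

-- ===== PORT B =====
-- state = (count, hi, lo): number of rooms, max start and min end of the accepted set
def pvStep (st : Int × Int × Int) (lec : List Int) : Int × Int × Int :=
  let s := PySem.List.pyGetD lec 0 0
  let e := PySem.List.pyGetD lec 1 0
  if st.1 = 0 then (1, s, e)
  else if st.2.1 ≤ e ∧ s ≤ st.2.2 then
    (st.1 + 1, if s > st.2.1 then s else st.2.1, if e < st.2.2 then e else st.2.2)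
  else st

def calcRooms_alt (lectures : List (List Int)) : Int :=
  (lectures.foldl pvStep (0, 0, 0)).1

-- ===== PRECONDITION & SPEC =====
-- Pre_ excludes inputs containing a lecture with fewer than two entries: on most of
-- them A raises IndexError, and on the degenerate rest (e.g. [[5]]) A only returns
-- by accident of its loop shape while B naturally raises IndexError there.
def Pre_calcRooms (lectures : List (List Int)) : Prop :=
  ∀ lec ∈ lectures, 2 ≤ lec.length
instance (lectures : List (List Int)) : Decidable (Pre_calcRooms lectures) := by
  unfold Pre_calcRooms; infer_instance

def pvWitness_calcRooms : List (List Int) := [[30,75],[0,50],[60,150]]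

def Spec_calcRooms (lectures : List (List Int)) (out : Int) : Prop := out = calcRooms_alt lectures
instance (lectures : List (List Int)) (out : Int) : Decidable (Spec_calcRooms lectures out) := by unfold Spec_calcRooms; infer_instance

-- ===== CLAIM (what is proved, stated in full; the proofs are below) =====
def Claim_equal_calcRooms : Prop := ∀ (lectures : List (List Int)), Dom_calcRooms lectures → Pre_calcRooms lectures → Spec_calcRooms lectures (calcRooms lectures)

-- ===== LEMMAS AND PROOFS =====

-- invariant tying A's rooms list to B's (count, hi, lo) state
def pvInv (rooms : List (List Int)) (st : Int × Int × Int) : Prop :=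
  st.1 = (rooms.length : Int) ∧
  (rooms ≠ [] → ∀ lec : List Int,
    (pvCanFit lec rooms = true ↔
      (PySem.List.pyGetD lec 1 0 < st.2.1 ∨ st.2.2 < PySem.List.pyGetD lec 0 0)))

theorem pvCanFit_append (l r : List Int) (rs : List (List Int)) :
    pvCanFit l (rs ++ [r]) =
      (pvCanFit l rs ||
        decide (PySem.List.pyGetD l 1 0 < PySem.List.pyGetD r 0 0
          ∨ PySem.List.pyGetD l 0 0 > PySem.List.pyGetD r 1 0)) := by
  induction rs with
  | nil => simp [pvCanFit]
  | cons x xs ih => by_cases h : PySem.List.pyGetD l 1 0 < PySem.List.pyGetD x 0 0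
      ∨ PySem.List.pyGetD l 0 0 > PySem.List.pyGetD x 1 0 <;> simp [pvCanFit, h, ih]

theorem pvStep_inv (rooms : List (List Int)) (st : Int × Int × Int) (lec : List Int)
    (h : pvInv rooms st) :
    pvInv (if !pvCanFit lec rooms then rooms ++ [lec] else rooms) (pvStep st lec) := by
  obtain ⟨hc, hiff⟩ := h
  cases rooms with
  | nil =>
    have hc0 : st.1 = 0 := by simpa using hc
    simp only [pvCanFit, Bool.not_false, if_pos]
    refine ⟨by simp [pvStep, hc0], fun _ l => ?_⟩
    simp only [pvStep, if_pos hc0, List.nil_append]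
    simp only [pvCanFit]
    split_ifs with h1 <;> simp <;> omega
  | cons r rs =>
    have hne : (r :: rs : List (List Int)) ≠ [] := by simp
    have hone := hiff hne
    have hc0 : ¬ st.1 = 0 := by
      have hlen : (r :: rs).length = rs.length + 1 := rfl
      rw [hc, hlen]; push_cast; omega
    by_cases hfit : pvCanFit lec (r :: rs) = true
    · -- lecture fits in some room: A keeps rooms, B keeps state
      have hB : ¬ (st.2.1 ≤ PySem.List.pyGetD lec 1 0 ∧ PySem.List.pyGetD lec 0 0 ≤ st.2.2) := by
        have := (hone lec).mp hfit; omega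
      simp only [hfit, Bool.not_true]
      simp only [pvStep, if_neg hc0, if_neg hB]
      exact ⟨hc, hiff⟩
    · -- overlaps all rooms: A appends, B extends the window
      have hB : st.2.1 ≤ PySem.List.pyGetD lec 1 0 ∧ PySem.List.pyGetD lec 0 0 ≤ st.2.2 := by
        by_contra hB
        exact hfit ((hone lec).mpr (by omega))
      simp only [hfit, Bool.not_false, if_pos]
      refine ⟨?_, fun _ l => ?_⟩
      · simp only [pvStep, if_neg hc0, if_pos hB]
        simp [hc]
      · simp only [pvStep, if_neg hc0, if_pos hB]
        rw [pvCanFit_append]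
        have hl := hone l
        by_cases h1 : pvCanFit l (r :: rs) = true
        · have := hl.mp h1
          simp only [h1, Bool.true_or, true_iff]
          split_ifs <;> omega
        · have := (not_iff_not.mpr hl).mp (by simp [h1])
          simp only [h1, Bool.false_or, decide_eq_true_eq]
          push Not at this
          split_ifs <;> omega

theorem pvFold_inv (lectures : List (List Int)) (rooms : List (List Int))
    (st : Int × Int × Int) (h : pvInv rooms st) :
    pvInv
      (lectures.foldl
        (fun rooms lecture => if !pvCanFit lecture rooms then rooms ++ [lecture] else rooms)
        rooms)
      (lectures.foldl pvStep st) := by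
  induction lectures generalizing rooms st with
  | nil => simpa using h
  | cons l ls ih =>
    simp only [List.foldl_cons]
    exact ih _ _ (pvStep_inv rooms st l h)

-- ===== VERDICT (by name: the statement is the Claim_ definition above) =====
theorem calcRooms_spec : Claim_equal_calcRooms := by
  intro lectures _ _
  have h := pvFold_inv lectures [] (0, 0, 0) (by constructor <;> simp)
  unfold Spec_calcRooms calcRooms calcRooms_alt
  exact h.1.symm
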